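-- pv_equiv track=rewrite | github.com/evanmiltenburg/AnalysePeopleDescriptions | Full-example/example.py | refers_to_human
-- ===== SOURCE A (Python) =====
-- def refers_to_human(chunk, head_dict):
--     "Determine whether a chunk should be included."
--     final_letter = chunk[-1]
--     chunk_list = chunk.split()
--     for head in head_dict[final_letter]:
--         head_list = head.split()
--         head_len = len(head_list)
--         if chunk_list[-head_len:] == head_list:
--             return True
--     return False
-- ===== SOURCE B (Python) =====
-- def refers_to_human(chunk, head_dict):
--     "Determine whether a chunk should be included."
--     words = chunk.split()
--     by_len = {}
--     for head in head_dict[chunk[-1]]: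
--         hw = tuple(head.split())
--         by_len.setdefault(len(hw), set()).add(hw)
--     for length, group in by_len.items():
--         if tuple(words[-length:]) in group:
--             return True
--     return False
-- ===== Notes on version B (the rewrite author's own statement) =====
-- stated objective: alternative
-- what changed: B groups the candidate head word-tuples into a dict keyed by suffix length built in one pass, then does one hash-set membership test per distinct length instead of a per-head slice comparison.
import Mathlib
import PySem

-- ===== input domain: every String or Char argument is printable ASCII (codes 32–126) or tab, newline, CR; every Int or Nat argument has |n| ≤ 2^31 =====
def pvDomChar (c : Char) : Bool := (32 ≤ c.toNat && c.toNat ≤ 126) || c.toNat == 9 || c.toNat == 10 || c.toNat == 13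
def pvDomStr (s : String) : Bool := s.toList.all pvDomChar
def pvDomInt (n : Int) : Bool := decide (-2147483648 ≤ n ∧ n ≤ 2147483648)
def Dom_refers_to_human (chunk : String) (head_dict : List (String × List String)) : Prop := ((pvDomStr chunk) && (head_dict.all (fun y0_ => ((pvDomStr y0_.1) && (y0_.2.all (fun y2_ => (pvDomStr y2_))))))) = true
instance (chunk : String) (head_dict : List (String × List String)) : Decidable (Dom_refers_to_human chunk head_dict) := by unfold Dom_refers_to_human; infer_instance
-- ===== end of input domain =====

-- B replaces A's per-head trailing-slice comparison by a length-indexed dictionary of head word-tuples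
-- (built in one pass) with one set-membership test per distinct length (objective: alternative).


-- ===== PORT A =====
-- A's for-loop with early return over the heads list
def refersGo (chunk_list : List String) : List String → Bool
  | [] => false
  | head :: rest =>
    let head_list := PySem.Str.split₀ head
    let head_len := head_list.length
    if PySem.List.slice chunk_list (some (-(head_len : Int))) none == head_list then true
    else refersGo chunk_list rest

def refers_to_human (chunk : String) (head_dict : List (String × List String)) : Bool :=
  match PySem.Str.pyGet? chunk (-1) with        -- chunk[-1]; none = IndexError (excluded by Pre_)
  | none => false
  | some final_letter =>
    let chunk_list := PySem.Str.split₀ chunk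
    match PySem.Dict.get? (PySem.Dict.mk head_dict) (String.mk [final_letter]) with   -- KeyError excluded by Pre_
    | none => false
    | some heads => refersGo chunk_list heads

-- ===== PORT B =====
def refers_to_human_alt (chunk : String) (head_dict : List (String × List String)) : Bool :=
  let words := PySem.Str.split₀ chunk
  match PySem.Str.pyGet? chunk (-1) with
  | none => false
  | some c =>
    match PySem.Dict.get? (PySem.Dict.mk head_dict) (String.mk [c]) with
    | none => false
    | some heads =>
      let by_len : PySem.Dict Int (PySem.Set (List String)) :=
        heads.foldl (fun d head =>
          let hw := PySem.Str.split₀ head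
          d.modify ((hw.length : Int)) PySem.Set.empty (fun s => s.add hw)) PySem.Dict.empty
      by_len.items.any (fun p => p.2.contains (PySem.List.slice words (some (-p.1)) none))

-- ===== PRECONDITION & SPEC =====
-- Pre_ excludes exactly the inputs where Python A raises: empty chunk (IndexError on chunk[-1])
-- and a final letter that is not a key of head_dict (KeyError).
def Pre_refers_to_human (chunk : String) (head_dict : List (String × List String)) : Prop :=
  chunk.toList ≠ [] ∧
  (PySem.Dict.mk head_dict).contains (String.mk (chunk.toList.drop (chunk.toList.length - 1))) = true
instance (chunk : String) (head_dict : List (String × List String)) : Decidable (Pre_refers_to_human chunk head_dict) := by unfold Pre_refers_to_human; infer_instance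
def pvWitness_refers_to_human : String × (List (String × List String)) := ("a", [("a", ["a"])])
def Spec_refers_to_human (chunk : String) (head_dict : List (String × List String)) (out : Bool) : Prop := out = refers_to_human_alt chunk head_dict
instance (chunk : String) (head_dict : List (String × List String)) (out : Bool) : Decidable (Spec_refers_to_human chunk head_dict out) := by unfold Spec_refers_to_human; infer_instance

-- ===== CLAIM (what is proved, stated in full; the proofs are below) =====
def Claim_equal_refers_to_human : Prop := ∀ (chunk : String) (head_dict : List (String × List String)), Dom_refers_to_human chunk head_dict → Pre_refers_to_human chunk head_dict → Spec_refers_to_human chunk head_dict (refers_to_human chunk head_dict)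

-- ===== LEMMAS AND PROOFS =====

-- A's loop is an `any` over the heads.
theorem refersGo_eq_any (words : List String) (heads : List String) :
    refersGo words heads = heads.any (fun h =>
      PySem.List.slice words (some (-(((PySem.Str.split₀ h).length : Nat) : Int))) none == PySem.Str.split₀ h) := by
  induction heads with
  | nil => rfl
  | cons h t ih =>
    simp only [refersGo, List.any_cons, ← ih]
    cases hc : (PySem.List.slice words (some (-((PySem.Str.split₀ h).length : Int))) none == PySem.Str.split₀ h) <;>
      simp_all

-- value of the grouping fold at one key
theorem getD_groupFold (heads : List String) (L : Int)
    (d : PySem.Dict Int (PySem.Set (List String))) :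
    (heads.foldl (fun d head =>
        let hw := PySem.Str.split₀ head
        d.modify ((hw.length : Int)) PySem.Set.empty (fun s => s.add hw)) d).getD L PySem.Set.empty
      = ((heads.map PySem.Str.split₀).filter (fun hw => ((hw.length : Int) == L))).foldl
          (fun s hw => PySem.Set.add s hw) (d.getD L PySem.Set.empty) := by
  induction heads generalizing d with
  | nil => rfl
  | cons h t ih =>
    simp only [List.foldl_cons, List.map_cons, List.filter_cons]
    rw [ih]
    by_cases hL : ((PySem.Str.split₀ h).length : Int) = L
    · simp [hL]
    · simp [hL, PySem.Dict.getD_modify, Ne.symm hL]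

-- the core equivalence of the two loop bodies
theorem main_eq (words heads : List String) :
    ((heads.foldl (fun d head =>
        let hw := PySem.Str.split₀ head
        d.modify ((hw.length : Int)) PySem.Set.empty (fun s => s.add hw))
        (PySem.Dict.empty : PySem.Dict Int (PySem.Set (List String)))).items.any
      (fun p => p.2.contains (PySem.List.slice words (some (-p.1)) none)))
    = refersGo words heads := by
  have hnd : (heads.foldl (fun d head =>
        let hw := PySem.Str.split₀ head
        d.modify ((hw.length : Int)) PySem.Set.empty (fun s => s.add hw))
        (PySem.Dict.empty : PySem.Dict Int (PySem.Set (List String)))).keys.Nodup :=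
    PySem.Dict.nodup_keys_foldl_modify_key heads
      (fun h => (((PySem.Str.split₀ h).length : Nat) : Int)) PySem.Set.empty
      (fun _ h => fun s => PySem.Set.add s (PySem.Str.split₀ h)) PySem.Dict.empty
      PySem.Dict.nodup_keys_empty
  rw [refersGo_eq_any, PySem.Dict.items_eq_map_keys _ hnd PySem.Set.empty, List.any_map]
  have hkeys : (heads.foldl (fun d head =>
        let hw := PySem.Str.split₀ head
        d.modify ((hw.length : Int)) PySem.Set.empty (fun s => s.add hw))
        (PySem.Dict.empty : PySem.Dict Int (PySem.Set (List String)))).keys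
      = PySem.Set.ofList (heads.map (fun h => (((PySem.Str.split₀ h).length : Nat) : Int))) := by
    rw [PySem.Dict.keys_foldl_modify_key heads
      (fun h => (((PySem.Str.split₀ h).length : Nat) : Int)) PySem.Set.empty
      (fun _ h => fun s => PySem.Set.add s (PySem.Str.split₀ h)) PySem.Dict.empty]
    simp [PySem.Set.update_nil_left]
  rw [hkeys]
  rw [Bool.eq_iff_iff]
  simp only [List.any_eq_true, Function.comp]
  constructor
  · rintro ⟨L, hL, hc⟩
    rw [getD_groupFold] at hc
    simp only [PySem.Dict.getD_empty] at hc
    rw [PySem.Set.contains_iff] at hc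
    have hc' := (PySem.Set.mem_foldl_add (f := id) _ _ _).mp hc
    simp only [id] at hc'
    rcases hc' with h0 | ⟨hw, hhw, heq⟩
    · simp [PySem.Set.empty] at h0
    · rcases List.mem_filter.mp hhw with ⟨hmem, hlen⟩
      rcases List.mem_map.mp hmem with ⟨h, hh, rfl⟩
      refine ⟨h, hh, ?_⟩
      have : ((PySem.Str.split₀ h).length : Int) = L := by simpa using hlen
      rw [beq_iff_eq, this, heq]
  · rintro ⟨h, hh, hc⟩
    refine ⟨((PySem.Str.split₀ h).length : Int), ?_, ?_⟩
    · rw [PySem.Set.mem_ofList]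
      exact List.mem_map.mpr ⟨h, hh, rfl⟩
    · rw [getD_groupFold]
      simp only [PySem.Dict.getD_empty]
      rw [PySem.Set.contains_iff]
      refine (PySem.Set.mem_foldl_add (f := id) _ _ _).mpr (Or.inr ⟨PySem.Str.split₀ h, ?_, ?_⟩)
      · exact List.mem_filter.mpr ⟨List.mem_map.mpr ⟨h, hh, rfl⟩, by simp⟩
      · exact beq_iff_eq.mp hc

-- ===== VERDICT (by name: the statement is the Claim_ definition above) =====
theorem refers_to_human_spec : Claim_equal_refers_to_human := by
  intro chunk head_dict _ _
  unfold Spec_refers_to_human refers_to_human refers_to_human_alt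
  cases PySem.Str.pyGet? chunk (-1) with
  | none => rfl
  | some c =>
    simp only
    cases PySem.Dict.get? (PySem.Dict.mk head_dict) (String.mk [c]) with
    | none => rfl
    | some heads => exact (main_eq (PySem.Str.split₀ chunk) heads).symm
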